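-- pv_equiv track=rewrite | github.com/rubenforti/WRemnants | wremnants/theory_tools.py | pdfNamesAsymHessian
-- ===== SOURCE A (Python) =====
-- def pdfNamesAsymHessian(entries, pdfset=""):
--     pdfNames = ["pdf0" + pdfset.replace("pdf", "")]
--     pdfNames.extend(
--         [
--             f"pdf{int((j+2)/2)}{pdfset.replace('pdf', '')}{'Up' if j % 2 else 'Down'}"
--             for j in range(entries - 1)
--         ]
--     )
--     return pdfNames
-- ===== SOURCE B (Python) =====
-- def pdfNamesAsymHessian(entries, pdfset=""):
--     def name(i, tag):
--         return "pdf{}{}{}".format(i, pdfset.replace("pdf", ""), tag)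
--     names = ["pdf0" + pdfset.replace("pdf", "")]
--     remaining = entries - 1
--     i = 1
--     while remaining > 0:
--         names.append(name(i, "Down"))
--         remaining -= 1
--         if remaining > 0:
--             names.append(name(i, "Up"))
--             remaining -= 1
--         i += 1
--     return names
-- ===== Notes on version B (the rewrite author's own statement) =====
-- stated objective: alternative
-- what changed: Replaces the flat parity-indexed comprehension over range(entries-1) (with its int((j+2)/2) index arithmetic and conditional expression) with an explicit per-pair loop driven by a remaining counter: one iteration per Hessian pair i = 1, 2, ... appends name(i,'Down') and, if any count remains, name(i,'Up'), via a small name-building helper.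
import Mathlib
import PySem

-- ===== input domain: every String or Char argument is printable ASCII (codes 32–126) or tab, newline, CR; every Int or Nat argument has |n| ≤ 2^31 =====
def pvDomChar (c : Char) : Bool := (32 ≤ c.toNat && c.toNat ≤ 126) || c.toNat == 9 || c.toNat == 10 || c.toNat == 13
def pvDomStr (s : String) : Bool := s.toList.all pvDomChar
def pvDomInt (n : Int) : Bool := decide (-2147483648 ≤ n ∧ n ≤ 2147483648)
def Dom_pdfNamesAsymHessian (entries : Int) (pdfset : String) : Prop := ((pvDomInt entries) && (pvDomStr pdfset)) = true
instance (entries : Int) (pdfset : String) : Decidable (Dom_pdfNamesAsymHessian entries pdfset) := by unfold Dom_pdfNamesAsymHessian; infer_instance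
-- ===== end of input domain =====

-- B replaces A's flat parity-indexed comprehension with an explicit per-pair loop over a
-- remaining counter and a name-building helper ("alternative" decomposition, same cost).

-- ===== PORT A =====
-- int((j+2)/2) on j ≥ 0 with values < 2^53 is exact float division and equals floor division
def pdfNamesAsymHessian (entries : Int) (pdfset : String) : List String :=
  let pdfNames := ["pdf0" ++ PySem.Str.replace pdfset "pdf" ""]
  pdfNames ++ (PySem.List.pyRange 0 (entries - 1) 1).map (fun j =>
    "pdf" ++ PySem.Int.toStr (PySem.Int.floordiv (j + 2) 2) ++ PySem.Str.replace pdfset "pdf" ""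
      ++ (if PySem.Int.mod j 2 ≠ 0 then "Up" else "Down"))

-- ===== PORT B =====
-- Source B's helper: name(i, tag) = "pdf{}{}{}".format(i, pdfset.replace("pdf", ""), tag)
def pvName (pdfset : String) (i : Int) (tag : String) : String :=
  "pdf" ++ PySem.Int.toStr i ++ PySem.Str.replace pdfset "pdf" "" ++ tag

-- the 'while remaining > 0' loop of Source B: one iteration per pair index i
def pvAltLoop (pdfset : String) (i : Int) (remaining : Int) : List String :=
  if 0 < remaining then
    pvName pdfset i "Down" ::
      (if 0 < remaining - 1 then
        pvName pdfset i "Up" :: pvAltLoop pdfset (i + 1) (remaining - 2)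
      else pvAltLoop pdfset (i + 1) (remaining - 1))
  else []
termination_by remaining.toNat
decreasing_by all_goals omega

def pdfNamesAsymHessian_alt (entries : Int) (pdfset : String) : List String :=
  ("pdf0" ++ PySem.Str.replace pdfset "pdf" "") :: pvAltLoop pdfset 1 (entries - 1)

-- ===== PRECONDITION & SPEC =====
def Spec_pdfNamesAsymHessian (entries : Int) (pdfset : String) (out : List String) : Prop := out = pdfNamesAsymHessian_alt entries pdfset
instance (entries : Int) (pdfset : String) (out : List String) : Decidable (Spec_pdfNamesAsymHessian entries pdfset out) := by unfold Spec_pdfNamesAsymHessian; infer_instance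

-- ===== CLAIM (what is proved, stated in full; the proofs are below) =====
def Claim_equal_pdfNamesAsymHessian : Prop := ∀ (entries : Int) (pdfset : String), Dom_pdfNamesAsymHessian entries pdfset → Spec_pdfNamesAsymHessian entries pdfset (pdfNamesAsymHessian entries pdfset)

-- ===== LEMMAS AND PROOFS =====

theorem pvFloordiv_two_mul (i : Int) : PySem.Int.floordiv (2 * i) 2 = i := by
  rw [PySem.Int.floordiv_eq_ediv_of_pos (by omega)]; omega

theorem pvFloordiv_two_mul_add_one (i : Int) : PySem.Int.floordiv (2 * i + 1) 2 = i := by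
  rw [PySem.Int.floordiv_eq_ediv_of_pos (by omega)]; omega

theorem pvMod_two_mul (i : Int) : PySem.Int.mod (2 * i) 2 = 0 := by
  rw [PySem.Int.mod_eq_emod_of_pos (by omega)]; omega

theorem pvMod_two_mul_add_one (i : Int) : PySem.Int.mod (2 * i + 1) 2 = 1 := by
  rw [PySem.Int.mod_eq_emod_of_pos (by omega)]; omega

-- the comprehension over a block of n consecutive indices starting at 2*(i-1) produces
-- exactly the per-pair loop started at pair index i with remaining count n
theorem pvMain (pdfset : String) (n : Nat) : ∀ (i : Int),
    (PySem.List.pyRange (2 * (i - 1)) (2 * (i - 1) + n) 1).map (fun j =>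
      "pdf" ++ PySem.Int.toStr (PySem.Int.floordiv (j + 2) 2) ++ PySem.Str.replace pdfset "pdf" ""
        ++ (if PySem.Int.mod j 2 ≠ 0 then "Up" else "Down"))
      = pvAltLoop pdfset i n := by
  induction n using Nat.strong_induction_on with
  | _ n ih =>
    intro i
    match n with
    | 0 =>
      rw [PySem.List.pyRange_one_eq_nil (by omega), pvAltLoop]
      simp
    | 1 =>
      have h1 : pvAltLoop pdfset i ((1 : Nat) : Int)
          = ["pdf" ++ PySem.Int.toStr i ++ PySem.Str.replace pdfset "pdf" "" ++ "Down"] := by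
        rw [pvAltLoop, if_pos (by norm_num), if_neg (by norm_num), pvAltLoop, if_neg (by norm_num)]
        simp [pvName]
      rw [show (2 * (i - 1) + ((1 : Nat) : Int)) = 2 * (i - 1) + 1 by norm_num,
        PySem.List.pyRange_one_singleton, h1]
      simp only [List.map_cons, List.map_nil, pvMod_two_mul,
        show 2 * (i - 1) + 2 = 2 * i by ring, pvFloordiv_two_mul]
      norm_num
    | (m + 2) =>
      have hcons : PySem.List.pyRange (2 * (i - 1)) (2 * (i - 1) + (m + 2 : Nat)) 1
          = 2 * (i - 1) :: (2 * (i - 1) + 1) ::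
            PySem.List.pyRange (2 * ((i + 1) - 1)) (2 * ((i + 1) - 1) + m) 1 := by
        rw [PySem.List.pyRange_one_cons (by push_cast; omega),
          PySem.List.pyRange_one_cons (by push_cast; omega)]
        congr 2 <;> push_cast <;> ring
      rw [hcons, pvAltLoop]
      simp only [pvName, List.map_cons, pvMod_two_mul,
        show 2 * (i - 1) + 2 = 2 * i by ring, pvFloordiv_two_mul,
        show 2 * (i - 1) + 1 + 2 = 2 * i + 1 by ring, pvFloordiv_two_mul_add_one,
        pvMod_two_mul_add_one]
      rw [ih m (by omega) (i + 1), if_pos (show (0:Int) < ((m+2:Nat):Int) by push_cast; omega),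
        if_pos (show (0:Int) < ((m+2:Nat):Int) - 1 by push_cast; omega),
        show ((m+2:Nat):Int) - 2 = ((m:Nat):Int) by push_cast; ring]
      norm_num

-- ===== VERDICT (by name: the statement is the Claim_ definition above) =====
theorem pdfNamesAsymHessian_spec : Claim_equal_pdfNamesAsymHessian := by
  unfold Claim_equal_pdfNamesAsymHessian Spec_pdfNamesAsymHessian
  intro entries pdfset _
  unfold pdfNamesAsymHessian pdfNamesAsymHessian_alt
  simp only [List.singleton_append, List.cons.injEq, true_and]
  by_cases h : entries - 1 ≤ 0
  · rw [PySem.List.pyRange_one_eq_nil (by omega), pvAltLoop, if_neg (by omega)]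
    simp
  · have hn : entries - 1 = ((entries - 1).toNat : Int) := by omega
    rw [hn]
    have := pvMain pdfset (entries - 1).toNat 1
    simpa using this
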